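-- pv_equiv track=rewrite | github.com/humenghan/Lab-of-Cryptology | hw1/17300240009_crack_vigenere.py | make_cosets
-- ===== SOURCE A (Python) =====
-- def make_cosets(text, n):
--     """Makes cosets out of a ciphertext given a key length; should return an array of strings"""
--
--     cosets = []
--
--     for index in range(n):
--       i = 0
--       nextword = ""
--       while (i + index) <= (len(text) - 1):
--         nextword += text[i + index]
--         i += n
--
--       cosets.append(nextword)
--
--     return cosets
-- ===== SOURCE B (Python) =====
-- def make_cosets(text, n):
--     """Makes cosets out of a ciphertext given a key length; should return an array of strings"""
--     if n <= 0:
--         return []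
--     cosets = [""] * n
--     for j, ch in enumerate(text):
--         cosets[j % n] += ch
--     return cosets
-- ===== Notes on version B (the rewrite author's own statement) =====
-- stated objective: simpler
-- what changed: Replaces A's n outer passes (one striding while-loop per coset index) with a single distributing pass over the text that appends each character to bucket j % n.
import Mathlib
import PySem

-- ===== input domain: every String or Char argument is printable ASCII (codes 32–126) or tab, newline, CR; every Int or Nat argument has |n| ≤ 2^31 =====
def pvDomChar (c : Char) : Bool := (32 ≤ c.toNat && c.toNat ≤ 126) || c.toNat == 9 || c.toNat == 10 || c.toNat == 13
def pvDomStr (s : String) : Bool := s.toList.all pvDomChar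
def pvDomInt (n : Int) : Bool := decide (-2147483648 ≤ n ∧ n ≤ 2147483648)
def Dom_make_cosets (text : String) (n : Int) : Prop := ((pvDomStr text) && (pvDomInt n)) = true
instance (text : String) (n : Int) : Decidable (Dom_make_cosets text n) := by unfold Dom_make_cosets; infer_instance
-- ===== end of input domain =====

-- B replaces A's n striding passes (one per coset index) by one distributing pass over the text (objective: simpler); same results.

-- ===== PORT A =====
-- inner while-loop of A: nextword += text[i + index]; i += n.  The '0 < n' conjunct only
-- totalizes the loop (Python never enters it with n ≤ 0, since range(n) is then empty).
def mcInner (l : List Char) (n k : Int) (i : Int) (acc : List Char) : List Char :=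
  if _h : 0 < n ∧ i + k ≤ (l.length : Int) - 1 then
    mcInner l n k (i + n) (acc ++ [(PySem.List.pyGet? l (i + k)).getD ' '])
  else acc
termination_by ((l.length : Int) - (i + k)).toNat
decreasing_by omega

def make_cosets (text : String) (n : Int) : List String :=
  (PySem.List.pyRange 0 n 1).foldl
    (fun cosets index => cosets ++ [String.ofList (mcInner text.toList n index 0 [])]) []

-- ===== PORT B =====
-- one step of B's loop: cosets[j % n] += ch
def mcStep (n : Int) (cs : List (List Char)) (p : Int × Char) : List (List Char) :=
  let r := (PySem.Int.mod p.1 n).toNat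
  cs.set r (cs.getD r [] ++ [p.2])

def make_cosets_alt (text : String) (n : Int) : List String :=
  if n ≤ 0 then []
  else ((PySem.List.enumerate text.toList 0).foldl (mcStep n) (List.replicate n.toNat [])).map String.ofList

-- ===== PRECONDITION & SPEC =====
def Spec_make_cosets (text : String) (n : Int) (out : List String) : Prop := out = make_cosets_alt text n
instance (text : String) (n : Int) (out : List String) : Decidable (Spec_make_cosets text n out) := by unfold Spec_make_cosets; infer_instance

-- ===== CLAIM (what is proved, stated in full; the proofs are below) =====
def Claim_equal_make_cosets : Prop := ∀ (text : String) (n : Int), Dom_make_cosets text n → Spec_make_cosets text n (make_cosets text n)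

-- ===== LEMMAS AND PROOFS =====

-- A's inner loop on text ++ [c]: it picks up the extra character exactly when position
-- l.length lies on the arithmetic progression i+k, i+k+n, … .
lemma mcInner_snoc (m : Nat) (l : List Char) (c : Char) (n k : Int) (hn : 0 < n) :
    ∀ (i : Int) (acc : List Char), ((l.length : Int) + 1 - (i + k)).toNat ≤ m → 0 ≤ i + k →
    mcInner (l ++ [c]) n k i acc =
      mcInner l n k i acc ++
        (if i + k ≤ (l.length : Int) ∧ ((l.length : Int) - (i + k)) % n = 0 then [c] else []) := by
  induction m with
  | zero =>
    intro i acc hm hik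
    have hgt : (l.length : Int) < i + k := by omega
    conv_lhs => rw [mcInner]
    rw [dif_neg (by simp only [List.length_append, List.length_cons, List.length_nil]; push_cast; omega)]
    conv_rhs => rw [mcInner]
    rw [dif_neg (by omega), if_neg (by omega)]
    simp
  | succ m ih =>
    intro i acc hm hik
    by_cases hle : i + k ≤ (l.length : Int) - 1
    · -- both loops step, on the same character
      conv_lhs => rw [mcInner]
      rw [dif_pos ⟨hn, by simp only [List.length_append, List.length_cons, List.length_nil]; push_cast; omega⟩]
      conv_rhs => rw [mcInner]
      rw [dif_pos ⟨hn, hle⟩]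
      have hidx : PySem.List.pyGet? (l ++ [c]) (i + k) = PySem.List.pyGet? l (i + k) := by
        have h1 : i + k = ((i + k).toNat : Int) := by omega
        rw [h1, PySem.List.pyGet?_natCast, PySem.List.pyGet?_natCast,
          List.getElem?_append_left (by omega)]
      rw [hidx, ih (i + n) _ (by omega) (by omega)]
      congr 1
      have hmod : ((l.length : Int) - (i + n + k)) % n = ((l.length : Int) - (i + k)) % n := by
        have h : (l.length : Int) - (i + n + k) = ((l.length : Int) - (i + k)) - n := by ring
        rw [h, Int.sub_emod_right]
      by_cases hz : ((l.length : Int) - (i + k)) % n = 0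
      · have hdvd : n ∣ ((l.length : Int) - (i + k)) := Int.dvd_of_emod_eq_zero hz
        have hge : n ≤ (l.length : Int) - (i + k) := Int.le_of_dvd (by omega) hdvd
        rw [if_pos ⟨by omega, hmod.trans hz⟩, if_pos ⟨by omega, hz⟩]
      · rw [if_neg (fun h => hz (hmod ▸ h.2)), if_neg (fun h => hz h.2)]
    · by_cases heq : i + k = (l.length : Int)
      · -- l's loop stops; (l ++ [c])'s loop takes exactly the last character and stops
        conv_lhs => rw [mcInner]
        rw [dif_pos ⟨hn, by simp only [List.length_append, List.length_cons, List.length_nil]; push_cast; omega⟩]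
        have hidx : PySem.List.pyGet? (l ++ [c]) (i + k) = some c := by
          rw [heq]; exact PySem.List.pyGet?_append_length l [] c
        rw [hidx]
        conv_lhs => rw [mcInner]
        rw [dif_neg (by simp only [List.length_append, List.length_cons, List.length_nil]; push_cast; omega)]
        conv_rhs => rw [mcInner]
        rw [dif_neg (by omega), if_pos ⟨by omega, by rw [heq]; simp⟩]
        simp
      · conv_lhs => rw [mcInner]
        rw [dif_neg (by simp only [List.length_append, List.length_cons, List.length_nil]; push_cast; omega)]
        conv_rhs => rw [mcInner]
        rw [dif_neg (by omega), if_neg (by omega)]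
        simp

lemma fmod_nonneg_pos (a n : Int) (hn : 0 < n) : PySem.Int.mod a n = a % n := by
  simp [PySem.Int.mod, Int.fmod_eq_emod_of_nonneg _ (le_of_lt hn)]

-- the heart: A's list of cosets (as char lists) equals B's buckets, by snoc induction on the text
lemma cosets_eq (n : Int) (hn : 0 < n) (l : List Char) :
    (PySem.List.pyRange 0 n 1).map (fun k => mcInner l n k 0 []) =
      (PySem.List.enumerate l 0).foldl (mcStep n) (List.replicate n.toNat []) := by
  induction l using List.reverseRecOn with
  | nil =>
    have h : ∀ k ∈ PySem.List.pyRange 0 n 1, mcInner ([] : List Char) n k 0 [] = [] := by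
      intro k hk
      have := (PySem.List.mem_pyRange_one.mp hk).1
      rw [mcInner, dif_neg (by simp; omega)]
    rw [List.map_congr_left h, List.map_const']
    simp [PySem.List.length_pyRange_one]
  | append_singleton l c ih =>
    rw [PySem.List.enumerate_append, List.foldl_append, ← ih]
    simp only [PySem.List.enumerate_cons, PySem.List.enumerate_nil, List.foldl_cons,
      List.foldl_nil, zero_add, mcStep]
    rw [fmod_nonneg_pos _ _ hn]
    have hmodnn : 0 ≤ (l.length : Int) % n := Int.emod_nonneg _ (by omega)
    have hmodlt : (l.length : Int) % n < n := Int.emod_lt_of_pos _ hn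
    have hmodle : (l.length : Int) % n ≤ (l.length : Int) := by
      by_cases hc : (l.length : Int) < n
      · rw [Int.emod_eq_of_lt (by omega) hc]
      · omega
    have hjmap : ∀ (f : Int → List Char) (j : Nat), j < n.toNat →
        ((PySem.List.pyRange 0 n 1).map f).getD j [] = f (j : Int) := by
      intro f j hj
      rw [List.getD_eq_getElem _ _ (by simp [PySem.List.length_pyRange_one]; omega),
        List.getElem_map, PySem.List.getElem_pyRange_one, zero_add]
    apply List.ext_getElem
    · simp [PySem.List.length_pyRange_one]
    intro j h1 h2
    have hj : j < n.toNat := by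
      simp only [List.length_map, PySem.List.length_pyRange_one] at h1; omega
    rw [List.getElem_map, PySem.List.getElem_pyRange_one, zero_add, List.getElem_set]
    have hsnoc := mcInner_snoc (l.length + 2) l c n (j : Int) hn 0 [] (by omega) (by omega)
    simp only [zero_add] at hsnoc
    rw [hsnoc]
    by_cases hj_eq : ((l.length : Int) % n).toNat = j
    · rw [if_pos hj_eq, hjmap _ _ (by omega)]
      have hjv : (j : Int) = (l.length : Int) % n := by omega
      have hz : ((l.length : Int) - (j : Int)) % n = 0 := by
        apply Int.emod_eq_emod_iff_emod_sub_eq_zero.mp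
        rw [hjv, Int.emod_emod_of_dvd _ (dvd_refl n)]
      rw [if_pos ⟨by omega, hz⟩, hjv, Int.toNat_of_nonneg hmodnn]
    · rw [if_neg hj_eq]
      have hcond : ¬ ((j : Int) ≤ (l.length : Int) ∧ ((l.length : Int) - (j : Int)) % n = 0) := by
        intro ⟨hle2, hz⟩
        have h := Int.emod_eq_emod_iff_emod_sub_eq_zero.mpr hz
        rw [Int.emod_eq_of_lt (by omega) (by omega : (j : Int) < n)] at h
        omega
      rw [if_neg hcond, List.getElem_map, PySem.List.getElem_pyRange_one, zero_add]
      simp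

-- ===== VERDICT (by name: the statement is the Claim_ definition above) =====
theorem make_cosets_spec : Claim_equal_make_cosets := by
  intro text n _
  unfold Spec_make_cosets make_cosets make_cosets_alt
  by_cases hn : n ≤ 0
  · rw [if_pos hn, PySem.List.pyRange_one_eq_nil hn]; rfl
  · rw [if_neg hn, PySem.List.foldl_append_singleton_eq_map, List.nil_append,
      ← cosets_eq n (by omega) text.toList, List.map_map]
    rfl
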